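-- pv_equiv track=rewrite | github.com/Ailostera/workshop_decorators | homework/block_1_easy.py | str_multiply
-- ===== SOURCE A (Python) =====
-- def str_multiply(string: str, number: int) -> str:
--     mult_str = ''
--     for i in range(number):
--         if i % 2 == 0:
--             mult_str += string
--         else:
--             mult_str += string.upper()
--     return mult_str
-- ===== SOURCE B (Python) =====
-- def str_multiply(string: str, number: int) -> str:
--     if number <= 0:
--         return ''
--     pair = string + string.upper()
--     return pair * (number // 2) + string * (number % 2)
-- ===== Notes on version B (the rewrite author's own statement) =====
-- stated objective: simpler
-- what changed: Replaces the per-index parity loop of repeated concatenation with whole-pair string repetition: (string + string.upper()) * (number // 2) plus one trailing string when number is odd (non-positive counts handled first).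
import Mathlib
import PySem

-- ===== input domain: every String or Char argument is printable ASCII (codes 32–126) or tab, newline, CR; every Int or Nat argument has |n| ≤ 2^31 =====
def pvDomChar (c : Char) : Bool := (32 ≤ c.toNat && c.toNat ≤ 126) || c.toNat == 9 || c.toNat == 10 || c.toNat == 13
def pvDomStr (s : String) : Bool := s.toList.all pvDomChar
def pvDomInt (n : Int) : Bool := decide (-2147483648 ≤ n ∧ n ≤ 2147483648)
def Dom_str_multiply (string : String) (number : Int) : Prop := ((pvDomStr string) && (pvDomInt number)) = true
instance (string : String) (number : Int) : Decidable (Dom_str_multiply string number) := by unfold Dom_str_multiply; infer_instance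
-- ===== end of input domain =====

-- B replaces A's per-index parity loop by whole-pair repetition: (s + s.upper()) * (n // 2)
-- plus one trailing s when n is odd; equivalence of the return values is proved below.

-- ===== PORT A =====
def str_multiply (string : String) (number : Int) : String :=
  String.ofList ((PySem.List.pyRange 0 number 1).foldl
    (fun mult_str i =>
      if PySem.Int.mod i 2 == 0 then mult_str ++ string.toList
      else mult_str ++ PySem.Chars.upper string.toList) [])

-- ===== PORT B =====
def str_multiply_alt (string : String) (number : Int) : String :=
  if number ≤ 0 then ""
  else
    let pair := string.toList ++ PySem.Chars.upper string.toList
    String.ofList (PySem.List.pyRepeat pair (PySem.Int.floordiv number 2) ++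
               PySem.List.pyRepeat string.toList (PySem.Int.mod number 2))

-- ===== PRECONDITION & SPEC =====
def Spec_str_multiply (string : String) (number : Int) (out : String) : Prop := out = str_multiply_alt string number
instance (string : String) (number : Int) (out : String) : Decidable (Spec_str_multiply string number out) := by unfold Spec_str_multiply; infer_instance

-- ===== CLAIM (what is proved, stated in full; the proofs are below) =====
def Claim_equal_str_multiply : Prop := ∀ (string : String) (number : Int), Dom_str_multiply string number → Spec_str_multiply string number (str_multiply string number)

-- ===== LEMMAS AND PROOFS =====

lemma pv_mod_natCast (k : Nat) : PySem.Int.mod (k : Int) 2 = ((k % 2 : Nat) : Int) := by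
  simp [PySem.Int.mod, Int.fmod_eq_emod_of_nonneg]

lemma pv_fdiv_natCast (m : Nat) : PySem.Int.floordiv (m : Int) 2 = ((m / 2 : Nat) : Int) := by
  simp [PySem.Int.floordiv, Int.fdiv_eq_ediv_of_nonneg]

-- the alternating flatMap over range m is m/2 pairs followed by m%2 extra copies of s
lemma pv_flat_range (s S : List Char) (m : Nat) :
    (List.range m).flatMap (fun k => if (k % 2 == 0 : Bool) then s else S)
      = (List.replicate (m / 2) (s ++ S)).flatten ++ (List.replicate (m % 2) s).flatten := by
  induction m using Nat.twoStepInduction with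
  | zero => simp
  | one => simp
  | more m ih _ =>
    have hr : List.range (m + 2) = List.range m ++ [m, m + 1] := by
      rw [List.range_succ, List.range_succ]; simp
    have hd : (m + 2) / 2 = m / 2 + 1 := by omega
    have hm : (m + 2) % 2 = m % 2 := by omega
    rw [hr, List.flatMap_append, ih, hd, hm, List.replicate_succ']
    rcases Nat.even_or_odd m with he | ho
    · have h0 : m % 2 = 0 := Nat.even_iff.mp he
      have h1 : (m + 1) % 2 = 1 := by omega
      simp [h0, h1, List.flatMap]
    · have h0 : m % 2 = 1 := Nat.odd_iff.mp ho
      have h1 : (m + 1) % 2 = 0 := by omega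
      simp [h0, h1, List.flatMap]

-- ===== VERDICT (by name: the statement is the Claim_ definition above) =====
theorem str_multiply_spec : Claim_equal_str_multiply := by
  intro string number _
  unfold Spec_str_multiply str_multiply str_multiply_alt
  by_cases hle : number ≤ 0
  · rw [PySem.List.pyRange_one_eq_nil (by omega)]
    simp [hle]
  · replace hle : 0 < number := by omega
    simp only [if_neg (by omega : ¬ number ≤ 0)]
    -- turn the loop body into an append of an if, then into a flatMap
    rw [PySem.List.foldl_congr_mem _ _
        (fun acc i => acc ++ (if PySem.Int.mod i 2 == 0 then string.toList
                              else PySem.Chars.upper string.toList)) _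
        (by intro acc x _; dsimp only; split <;> rfl),
      PySem.List.foldl_append_eq_flatMap, PySem.List.pyRange_one, List.flatMap_map]
    obtain ⟨m, rfl⟩ : ∃ m : Nat, number = (m : Int) :=
      ⟨number.toNat, (Int.toNat_of_nonneg (by omega)).symm⟩
    have hbody : ∀ k : Nat,
        (if PySem.Int.mod ((0 : Int) + (k : Int)) 2 == 0 then string.toList
         else PySem.Chars.upper string.toList)
        = (if (k % 2 == 0 : Bool) then string.toList else PySem.Chars.upper string.toList) := by
      intro k
      rw [zero_add, pv_mod_natCast]
      rcases Nat.even_or_odd k with he | ho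
      · simp [Nat.even_iff.mp he]
      · simp [Nat.odd_iff.mp ho]
    simp only [Int.sub_zero, Int.toNat_natCast, hbody]
    rw [pv_flat_range, pv_mod_natCast, pv_fdiv_natCast]
    simp only [PySem.List.pyRepeat, Int.toNat_natCast, List.nil_append]
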